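-- pv_equiv track=rewrite | github.com/Solomonz/Binary-Image-Compressor | image_compressor.py | encode_optimal_pairwise
-- ===== SOURCE A (Python) =====
-- from math import ceil, inf, log2
--
-- def num_to_bits(n, num_bits):
--     assert 0 <= n < 2**num_bits
--     return [1 if n & 2**i else 0 for i in range(num_bits - 1, -1, -1)]
--
-- def bit_array_to_run_length_array(bit_array):
--     out = []
--     cur_bit = bit_array[0]
--     cur_run_len = 0
--     for b in bit_array:
--         if b == cur_bit:
--             cur_run_len += 1
--         else:
--             out.append(cur_run_len)
--             cur_run_len = 1
--             cur_bit = b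
--     out.append(cur_run_len)
--     return out, bit_array[0]
--
-- def calculate_pairwise_encoding(run_length_array, first_bit, zero_len, one_len):
--     max_zeros = 2**zero_len - 1
--     max_ones = 2**one_len - 1
--
--     out = []
--     cur_run_bit = first_bit
--
--     for r in run_length_array:
--         cur_max_len = max_ones if cur_run_bit else max_zeros
--         cur_bit_len = one_len if cur_run_bit else zero_len
--         alternate_bit_len = zero_len if cur_run_bit else one_len
--         while r > cur_max_len:
--             out.extend(num_to_bits(cur_max_len, cur_bit_len))
--             out.extend(num_to_bits(0, alternate_bit_len))
--             r -= cur_max_len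
--         out.extend(num_to_bits(r, cur_bit_len))
--         cur_run_bit = 1 - cur_run_bit
--     return ceil((len(out) + 4 + 4 + 1) / 8), out
--
-- def encode_optimal_pairwise(bit_array):
--     best_byte_size = inf
--     best_num_bits = (None, None)
--     best_encoded = None
--     run_length_array, first_bit = bit_array_to_run_length_array(bit_array)
--     for i in range(1, 13):
--         for j in range(1, 13):
--             num_bytes, encoded = calculate_pairwise_encoding(
--                 run_length_array, first_bit, i, j
--             )
--             if num_bytes < best_byte_size:
--                 best_byte_size = num_bytes
--                 best_num_bits = (i, j)
--                 best_encoded = encoded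
--     return best_byte_size, best_encoded
-- ===== SOURCE B (Python) =====
-- from math import ceil
--
--
-- def _bits(n, num_bits):
--     return [1 if n & 2**p else 0 for p in range(num_bits - 1, -1, -1)]
--
--
-- def _run_lengths(bit_array):
--     out = []
--     cur_bit = bit_array[0]
--     cur_run_len = 0
--     for b in bit_array:
--         if b == cur_bit:
--             cur_run_len += 1
--         else:
--             out.append(cur_run_len)
--             cur_run_len = 1
--             cur_bit = b
--     out.append(cur_run_len)
--     return out, bit_array[0]
--
--
-- def _chunks(r, max_len):
--     # number of overflow chunks a run of length r needs: ceil(r/max_len) - 1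
--     return (r + max_len - 1) // max_len - 1
--
--
-- def _build(runs, first_bit, zero_len, one_len):
--     # build the encoding for one (zero_len, one_len) choice, run by run,
--     # emitting each overflow block by repetition instead of a while loop
--     out = []
--     for k, r in enumerate(runs):
--         bit = first_bit if k % 2 == 0 else 1 - first_bit
--         if bit:
--             c, d, m = one_len, zero_len, 2**one_len - 1
--         else:
--             c, d, m = zero_len, one_len, 2**zero_len - 1
--         q = _chunks(r, m)
--         out += (_bits(m, c) + _bits(0, d)) * q
--         out += _bits(r - q * m, c)
--     return out
--
--
-- def encode_optimal_pairwise(bit_array):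
--     runs, first_bit = _run_lengths(bit_array)
--     zeros = [r for k, r in enumerate(runs) if not (first_bit if k % 2 == 0 else 1 - first_bit)]
--     ones = [r for k, r in enumerate(runs) if (first_bit if k % 2 == 0 else 1 - first_bit)]
--     nz, no = len(zeros), len(ones)
--     best = None
--     for i in range(1, 13):
--         zi = sum(_chunks(r, 2**i - 1) for r in zeros)
--         for j in range(1, 13):
--             oj = sum(_chunks(r, 2**j - 1) for r in ones)
--             total_bits = (i + j) * (zi + oj) + i * nz + j * no
--             num_bytes = (total_bits + 9 + 7) // 8
--             if best is None or num_bytes < best[0]: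
--                 best = (num_bytes, i, j)
--     num_bytes, i, j = best
--     return num_bytes, _build(runs, first_bit, i, j)
-- ===== Notes on version B (the rewrite author's own statement) =====
-- stated objective: faster
-- what changed: Instead of building all 144 trial encodings and measuring their lengths, B splits the run-length array once into zero-runs and one-runs, computes each candidate's byte size by a closed-form arithmetic formula over per-run overflow-chunk counts, and builds only the winning encoding once.
import Mathlib
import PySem

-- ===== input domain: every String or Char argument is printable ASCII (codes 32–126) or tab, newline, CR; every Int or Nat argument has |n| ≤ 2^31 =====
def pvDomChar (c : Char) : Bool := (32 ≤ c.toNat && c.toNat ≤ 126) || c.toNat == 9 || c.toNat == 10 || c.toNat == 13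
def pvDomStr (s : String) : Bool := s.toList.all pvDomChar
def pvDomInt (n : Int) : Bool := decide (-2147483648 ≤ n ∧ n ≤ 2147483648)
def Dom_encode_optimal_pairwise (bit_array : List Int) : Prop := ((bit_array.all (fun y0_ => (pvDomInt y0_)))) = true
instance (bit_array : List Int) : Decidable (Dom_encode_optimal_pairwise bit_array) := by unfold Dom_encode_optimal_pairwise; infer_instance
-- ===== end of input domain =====

-- B replaces A's 144 full trial encodings by per-(i,j) arithmetic byte counts from per-run
-- chunk sums and builds only the winning encoding once (objective: faster).

-- ===== PORT A =====
/-- `num_to_bits` (Source B's `_bits` is the same code); `2**i` with `i ≥ 0` ported via `toNat`. -/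
def numToBits (n num_bits : Int) : List Int :=
  (PySem.List.pyRange (num_bits - 1) (-1) (-1)).map
    (fun i => if PySem.Int.band n ((2 : Int) ^ i.toNat) ≠ 0 then 1 else 0)

/-- loop body of `bit_array_to_run_length_array` (Source B's `_run_lengths` is the same code);
state is (out, cur_bit, cur_run_len). -/
def runLengthStep (st : List Int × Int × Int) (b : Int) : List Int × Int × Int :=
  if b == st.2.1 then (st.1, st.2.1, st.2.2 + 1) else (st.1 ++ [st.2.2], b, 1)

/-- `bit_array_to_run_length_array`; on `[]` Python raises IndexError (excluded by `Pre_`). -/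
def runLength (bit_array : List Int) : List Int × Int :=
  match bit_array with
  | [] => ([], 0)
  | b0 :: _ =>
    let st := bit_array.foldl runLengthStep ([], b0, 0)
    (st.1 ++ [st.2.2], b0)

/-- the `while r > cur_max_len` loop of `calculate_pairwise_encoding`; the `1 ≤ M` guard
only makes the recursion total (every call site has `M ≥ 1`). -/
def chunkLoop (r M c d : Int) : List Int :=
  if _h : M < r ∧ 1 ≤ M then
    numToBits M c ++ numToBits 0 d ++ chunkLoop (r - M) M c d
  else numToBits r c
termination_by r.toNat
decreasing_by omega

/-- loop body of `calculate_pairwise_encoding`; state is (out, cur_run_bit); Python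
truthiness `if cur_run_bit` is `≠ 0`. -/
def calcStep (max_zeros max_ones zero_len one_len : Int) (st : List Int × Int) (r : Int) :
    List Int × Int :=
  let M := if st.2 ≠ 0 then max_ones else max_zeros
  let c := if st.2 ≠ 0 then one_len else zero_len
  let d := if st.2 ≠ 0 then zero_len else one_len
  (st.1 ++ chunkLoop r M c d, 1 - st.2)

/-- `calculate_pairwise_encoding`; `ceil(x/8)` (a float, exact at these magnitudes) is
ported as the integer ceiling division `(x+7)//8`. -/
def calcPairwise (run_length_array : List Int) (first_bit zero_len one_len : Int) :
    Int × List Int :=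
  let max_zeros := (2 : Int) ^ zero_len.toNat - 1
  let max_ones := (2 : Int) ^ one_len.toNat - 1
  let st := run_length_array.foldl (calcStep max_zeros max_ones zero_len one_len)
    ([], first_bit)
  (PySem.Int.floordiv ((st.1.length : Int) + 4 + 4 + 1 + 7) 8, st.1)

/-- inner-loop body of A's search; `num_bytes < inf` is always true, hence the `none` case
always takes the candidate. -/
def encodeStep (rla : List Int) (first_bit i : Int)
    (best : Option (Int × (Int × Int) × List Int)) (j : Int) :
    Option (Int × (Int × Int) × List Int) :=
  let p := calcPairwise rla first_bit i j
  match best with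
  | none => some (p.1, (i, j), p.2)
  | some (b, q, e) => if p.1 < b then some (p.1, (i, j), p.2) else some (b, q, e)

/-- A's `return best_byte_size, best_encoded`; `none` is unreachable (the loops always run). -/
def unpackA : Option (Int × (Int × Int) × List Int) → Int × List Int
  | some (b, _, e) => (b, e)
  | none => (0, [])

def encode_optimal_pairwise (bit_array : List Int) : Int × List Int :=
  let rl := runLength bit_array
  unpackA ((PySem.List.pyRange 1 13 1).foldl
    (fun best i => (PySem.List.pyRange 1 13 1).foldl (encodeStep rl.1 rl.2 i) best) none)

-- ===== PORT B =====
/-- Source B `_chunks`: overflow-chunk count `ceil(r/m) - 1`. -/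
def chunksB (r m : Int) : Int := PySem.Int.floordiv (r + m - 1) m - 1

/-- Source B's `first_bit if k % 2 == 0 else 1 - first_bit`. -/
def bitAt (first_bit k : Int) : Int :=
  if PySem.Int.mod k 2 == 0 then first_bit else 1 - first_bit

/-- loop body of Source B `_build`: one run's bits, overflow blocks by list repetition. -/
def buildStep (first_bit zero_len one_len : Int) (out : List Int) (p : Int × Int) :
    List Int :=
  let bit := bitAt first_bit p.1
  let c := if bit ≠ 0 then one_len else zero_len
  let d := if bit ≠ 0 then zero_len else one_len
  let m := (2 : Int) ^ c.toNat - 1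
  let q := chunksB p.2 m
  out ++ (List.replicate q.toNat (numToBits m c ++ numToBits 0 d)).flatten
    ++ numToBits (p.2 - q * m) c

/-- Source B `_build`. -/
def buildB (runs : List Int) (first_bit zero_len one_len : Int) : List Int :=
  (PySem.List.enumerate runs 0).foldl (buildStep first_bit zero_len one_len) []

/-- inner-loop body of Source B's search over `j`. -/
def selStep (ones : List Int) (nz no zi i : Int)
    (best : Option (Int × Int × Int)) (j : Int) : Option (Int × Int × Int) :=
  let oj := (ones.map (fun r => chunksB r ((2 : Int) ^ j.toNat - 1))).sum
  let L := (i + j) * (zi + oj) + i * nz + j * no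
  let nb := PySem.Int.floordiv (L + 9 + 7) 8
  match best with
  | none => some (nb, i, j)
  | some b => if nb < b.1 then some (nb, i, j) else some b

/-- Source B's `return num_bytes, _build(runs, first_bit, i, j)`; `none` is unreachable. -/
def unpackB (runs : List Int) (first_bit : Int) : Option (Int × Int × Int) → Int × List Int
  | some b => (b.1, buildB runs first_bit b.2.1 b.2.2)
  | none => (0, [])

def encode_optimal_pairwise_alt (bit_array : List Int) : Int × List Int :=
  let rl := runLength bit_array
  let zeros := ((PySem.List.enumerate rl.1 0).filter (fun p => bitAt rl.2 p.1 == 0)).map (·.2)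
  let ones := ((PySem.List.enumerate rl.1 0).filter (fun p => bitAt rl.2 p.1 != 0)).map (·.2)
  unpackB rl.1 rl.2 ((PySem.List.pyRange 1 13 1).foldl
    (fun best i =>
      let zi := (zeros.map (fun r => chunksB r ((2 : Int) ^ i.toNat - 1))).sum
      (PySem.List.pyRange 1 13 1).foldl
        (selStep ones (zeros.length : Int) (ones.length : Int) zi i) best)
    none)

-- ===== PRECONDITION & SPEC =====
/-- Python A raises IndexError on the empty list (`bit_array[0]`). -/
def Pre_encode_optimal_pairwise (bit_array : List Int) : Prop := bit_array ≠ []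
instance (bit_array : List Int) : Decidable (Pre_encode_optimal_pairwise bit_array) := by
  unfold Pre_encode_optimal_pairwise; infer_instance
def pvWitness_encode_optimal_pairwise : List Int := [1, 0, 0, 1, 1, 1, 0]

def Spec_encode_optimal_pairwise (bit_array : List Int) (out : Int × List Int) : Prop :=
  out = encode_optimal_pairwise_alt bit_array
instance (bit_array : List Int) (out : Int × List Int) :
    Decidable (Spec_encode_optimal_pairwise bit_array out) := by
  unfold Spec_encode_optimal_pairwise; infer_instance

-- ===== CLAIM =====
def Claim_equal_encode_optimal_pairwise : Prop := ∀ (bit_array : List Int),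
  Dom_encode_optimal_pairwise bit_array → Pre_encode_optimal_pairwise bit_array →
  Spec_encode_optimal_pairwise bit_array (encode_optimal_pairwise bit_array)

-- ===== LEMMAS AND PROOFS =====
theorem chunksB_nonneg {r m : Int} (hr : 1 ≤ r) (hm : 1 ≤ m) : 0 ≤ chunksB r m := by
  unfold chunksB
  have := (PySem.Int.le_floordiv_iff_mul_le (a := r + m - 1) (b := m) (q := 1) (by omega)).mpr
    (by omega)
  omega

theorem chunksB_eq_zero {r m : Int} (hr : 1 ≤ r) (hrm : r ≤ m) : chunksB r m = 0 := by
  unfold chunksB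
  have := (PySem.Int.floordiv_eq_iff_of_pos (a := r + m - 1) (b := m) (q := 1) (by omega)).mpr
    (by constructor <;> omega)
  omega

theorem chunksB_succ {r m : Int} (hm : 1 ≤ m) (h : m < r) :
    chunksB r m = chunksB (r - m) m + 1 := by
  unfold chunksB
  have h1 : r + m - 1 = (r - m + m - 1) + 1 * m := by ring
  rw [h1, PySem.Int.floordiv_eq_ediv_of_pos (by omega),
    PySem.Int.floordiv_eq_ediv_of_pos (by omega),
    Int.add_mul_ediv_right _ _ (by omega : m ≠ 0)]
  ring

theorem length_numToBits (n c : Int) : (numToBits n c).length = c.toNat := by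
  simp [numToBits, PySem.List.length_pyRange_neg_one]

-- A's while loop emits exactly B's repeated overflow blocks plus the remainder
theorem chunkLoop_eq (r M c d : Int) (hr : 1 ≤ r) (hM : 1 ≤ M) :
    chunkLoop r M c d =
      (List.replicate (chunksB r M).toNat (numToBits M c ++ numToBits 0 d)).flatten
        ++ numToBits (r - chunksB r M * M) c := by
  by_cases h : M < r
  · rw [chunkLoop, dif_pos ⟨h, hM⟩, chunkLoop_eq (r - M) M c d (by omega) hM,
      chunksB_succ hM h]
    have h0 : 0 ≤ chunksB (r - M) M := chunksB_nonneg (by omega) hM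
    have h1 : (chunksB (r - M) M + 1).toNat = (chunksB (r - M) M).toNat + 1 := by omega
    rw [h1, List.replicate_succ, List.flatten_cons]
    simp only [List.append_assoc]
    congr 2
    ring_nf
  · rw [chunkLoop, dif_neg (by omega), chunksB_eq_zero hr (by omega)]
    simp
termination_by r.toNat
decreasing_by omega

theorem bitAt_succ (first_bit s : Int) : bitAt first_bit (s + 1) = 1 - bitAt first_bit s := by
  unfold bitAt
  rw [PySem.Int.mod_eq_emod_of_pos (by omega), PySem.Int.mod_eq_emod_of_pos (by omega)]
  rcases Int.emod_two_eq_zero_or_one s with h | h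
  · have : (s + 1) % 2 = 1 := by omega
    simp [h, this]
  · have : (s + 1) % 2 = 0 := by omega
    simp [h, this]

theorem one_le_pow_sub (c : Int) (hc : 1 ≤ c) : 1 ≤ (2 : Int) ^ c.toNat - 1 := by
  have : (2 : Int) ^ 1 ≤ 2 ^ c.toNat := pow_le_pow_right₀ (by omega) (by omega)
  simp at this; omega

-- A's encoding fold equals B's build fold: `cur_run_bit` after k runs is `bitAt first k`
theorem calc_fold_eq_build (runs : List Int) (first_bit zero_len one_len : Int)
    (s cur : Int) (out : List Int)
    (hcur : cur = bitAt first_bit s)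
    (hruns : ∀ r ∈ runs, 1 ≤ r)
    (hz : 1 ≤ zero_len) (ho : 1 ≤ one_len) :
    (runs.foldl (calcStep ((2 : Int) ^ zero_len.toNat - 1) ((2 : Int) ^ one_len.toNat - 1)
        zero_len one_len) (out, cur)).1 =
      (PySem.List.enumerate runs s).foldl (buildStep first_bit zero_len one_len) out := by
  induction runs generalizing s cur out with
  | nil => simp [PySem.List.enumerate]
  | cons r rs ih =>
    rw [PySem.List.enumerate_cons, List.foldl_cons, List.foldl_cons]
    have hr : 1 ≤ r := hruns r (by simp)
    have step_eq : (calcStep ((2 : Int) ^ zero_len.toNat - 1) ((2 : Int) ^ one_len.toNat - 1)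
        zero_len one_len (out, cur) r).1 = buildStep first_bit zero_len one_len out (s, r) := by
      have hm1 : 1 ≤ (2 : Int) ^ zero_len.toNat - 1 := one_le_pow_sub _ hz
      have hm2 : 1 ≤ (2 : Int) ^ one_len.toNat - 1 := one_le_pow_sub _ ho
      rcases eq_or_ne cur 0 with hc | hc
      · simp only [calcStep, buildStep, ← hcur, hc, ne_eq, not_true_eq_false, if_false]
        rw [chunkLoop_eq r _ _ _ hr hm1]
        simp [List.append_assoc]
      · simp only [calcStep, buildStep, ← hcur, hc, ne_eq, not_false_eq_true, if_true]
        rw [chunkLoop_eq r _ _ _ hr hm2]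
        simp [List.append_assoc]
    have hsnd : (calcStep ((2 : Int) ^ zero_len.toNat - 1) ((2 : Int) ^ one_len.toNat - 1)
        zero_len one_len (out, cur) r).2 = 1 - cur := rfl
    have := ih (s + 1) (1 - cur)
      (buildStep first_bit zero_len one_len out (s, r))
      (by rw [bitAt_succ, hcur]) (fun x hx => hruns x (by simp [hx]))
    rw [← this]
    congr 1
    rw [← step_eq, ← hsnd]

theorem length_buildStep (first_bit zero_len one_len : Int) (out : List Int) (p : Int × Int)
    (hz : 1 ≤ zero_len) (ho : 1 ≤ one_len) (hr : 1 ≤ p.2) :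
    ((buildStep first_bit zero_len one_len out p).length : Int) =
      (out.length : Int)
        + (zero_len + one_len) *
            chunksB p.2 ((2 : Int) ^ (if bitAt first_bit p.1 ≠ 0 then one_len
              else zero_len).toNat - 1)
        + (if bitAt first_bit p.1 ≠ 0 then one_len else zero_len) := by
  have hc : 1 ≤ (if bitAt first_bit p.1 ≠ 0 then one_len else zero_len) := by
    split_ifs <;> assumption
  have hq : 0 ≤ chunksB p.2 ((2 : Int) ^ (if bitAt first_bit p.1 ≠ 0 then one_len
      else zero_len).toNat - 1) := chunksB_nonneg hr (one_le_pow_sub _ hc)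
  simp only [buildStep, List.length_append, List.length_flatten, List.map_replicate,
    List.sum_replicate, length_numToBits, smul_eq_mul]
  push_cast [hq]
  have h1 : ((if bitAt first_bit p.1 ≠ 0 then one_len else zero_len).toNat : Int)
      = if bitAt first_bit p.1 ≠ 0 then one_len else zero_len := by omega
  have h2 : ((if bitAt first_bit p.1 ≠ 0 then zero_len else one_len).toNat : Int)
      = if bitAt first_bit p.1 ≠ 0 then zero_len else one_len := by
    split_ifs <;> omega
  rw [h1, h2]
  split_ifs with hb
  · rw [if_pos hb] at hq
    rw [Int.toNat_of_nonneg hq]; ring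
  · rw [if_neg hb] at hq
    rw [Int.toNat_of_nonneg hq]; ring

theorem length_build_fold (first_bit zero_len one_len : Int) (ps : List (Int × Int))
    (out : List Int) (hps : ∀ p ∈ ps, 1 ≤ p.2) (hz : 1 ≤ zero_len) (ho : 1 ≤ one_len) :
    ((ps.foldl (buildStep first_bit zero_len one_len) out).length : Int) =
      (out.length : Int)
      + (zero_len + one_len) *
          ((((ps.filter (fun p => bitAt first_bit p.1 == 0)).map (·.2)).map
              (fun r => chunksB r ((2 : Int) ^ zero_len.toNat - 1))).sum
           + (((ps.filter (fun p => bitAt first_bit p.1 != 0)).map (·.2)).map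
              (fun r => chunksB r ((2 : Int) ^ one_len.toNat - 1))).sum)
      + zero_len * ((ps.filter (fun p => bitAt first_bit p.1 == 0)).length : Int)
      + one_len * ((ps.filter (fun p => bitAt first_bit p.1 != 0)).length : Int) := by
  induction ps generalizing out with
  | nil => simp
  | cons p ps ih =>
    rw [List.foldl_cons, ih _ (fun q hq => hps q (by simp [hq]))]
    rw [length_buildStep _ _ _ _ _ hz ho (hps p (by simp))]
    rcases eq_or_ne (bitAt first_bit p.1) 0 with hb | hb
    · simp only [List.filter_cons, hb, beq_self_eq_true, bne_self_eq_false, if_true, if_false,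
        List.map_cons, List.sum_cons, List.length_cons, ne_eq, not_true_eq_false]
      push_cast
      ring
    · simp only [List.filter_cons, beq_iff_eq, hb, bne_iff_ne, ne_eq, not_false_eq_true,
        if_true, if_false, List.map_cons, List.sum_cons, List.length_cons]
      push_cast
      ring

theorem runLength_fold_pos (l : List Int) (st : List Int × Int × Int)
    (h1 : ∀ x ∈ st.1, 1 ≤ x) (h2 : 1 ≤ st.2.2) :
    (∀ x ∈ (l.foldl runLengthStep st).1, 1 ≤ x) ∧ 1 ≤ (l.foldl runLengthStep st).2.2 := by
  induction l generalizing st with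
  | nil => exact ⟨h1, h2⟩
  | cons b l ih =>
    rw [List.foldl_cons]
    apply ih
    · intro x hx
      unfold runLengthStep at hx
      split_ifs at hx
      · exact h1 x hx
      · rcases List.mem_append.mp hx with h | h
        · exact h1 x h
        · simp at h; omega
    · unfold runLengthStep
      split_ifs <;> simp <;> omega

theorem runLength_pos (bit_array : List Int) (h : bit_array ≠ []) :
    ∀ r ∈ (runLength bit_array).1, 1 ≤ r := by
  match bit_array with
  | b0 :: rest =>
    simp only [runLength, List.foldl_cons]
    have hstep : runLengthStep ([], b0, 0) b0 = ([], b0, 1) := by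
      simp [runLengthStep]
    rw [hstep]
    have hinv := runLength_fold_pos rest ([], b0, 1) (by simp) (by norm_num)
    intro r hr
    rcases List.mem_append.mp hr with h' | h'
    · exact hinv.1 r h'
    · simp at h'; omega

-- the exact quantities Source B's search uses, as functions of runs and first_bit
def zerosOf (runs : List Int) (f : Int) : List Int :=
  ((PySem.List.enumerate runs 0).filter (fun p => bitAt f p.1 == 0)).map (·.2)
def onesOf (runs : List Int) (f : Int) : List Int :=
  ((PySem.List.enumerate runs 0).filter (fun p => bitAt f p.1 != 0)).map (·.2)
def ziOf (runs : List Int) (f i : Int) : Int :=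
  ((zerosOf runs f).map (fun r => chunksB r ((2 : Int) ^ i.toNat - 1))).sum
def ojOf (runs : List Int) (f j : Int) : Int :=
  ((onesOf runs f).map (fun r => chunksB r ((2 : Int) ^ j.toNat - 1))).sum

theorem bitAt_zero (f : Int) : bitAt f 0 = f := rfl

theorem length_buildB (runs : List Int) (f i j : Int)
    (hruns : ∀ r ∈ runs, 1 ≤ r) (hi : 1 ≤ i) (hj : 1 ≤ j) :
    ((buildB runs f i j).length : Int) =
      (i + j) * (ziOf runs f i + ojOf runs f j)
        + i * ((zerosOf runs f).length : Int) + j * ((onesOf runs f).length : Int) := by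
  have hps : ∀ p ∈ PySem.List.enumerate runs 0, 1 ≤ p.2 := by
    intro p hp
    rcases (PySem.List.mem_enumerate_iff runs 0 p).mp hp with ⟨k, hk, rfl⟩
    exact hruns _ (List.getElem_mem hk)
  have hlen := length_build_fold f i j (PySem.List.enumerate runs 0) [] hps hi hj
  simp only [List.length_nil, zero_add, Nat.cast_zero] at hlen
  rw [show (buildB runs f i j) =
    (PySem.List.enumerate runs 0).foldl (buildStep f i j) [] from rfl, hlen]
  simp only [zerosOf, onesOf, ziOf, ojOf, List.length_map]

theorem calcPairwise_eq (runs : List Int) (f i j : Int)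
    (hruns : ∀ r ∈ runs, 1 ≤ r) (hi : 1 ≤ i) (hj : 1 ≤ j) :
    calcPairwise runs f i j =
      (PySem.Int.floordiv ((i + j) * (ziOf runs f i + ojOf runs f j)
          + i * (zerosOf runs f).length + j * (onesOf runs f).length + 9 + 7) 8,
        buildB runs f i j) := by
  have hfold := calc_fold_eq_build runs f i j 0 f [] (bitAt_zero f).symm hruns hi hj
  simp only [calcPairwise, Prod.mk.injEq]
  rw [show (PySem.List.enumerate runs 0).foldl (buildStep f i j) [] = buildB runs f i j
    from rfl] at hfold
  refine ⟨?_, hfold⟩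
  rw [hfold, length_buildB runs f i j hruns hi hj]
  congr 1
  ring

-- invariant tying A's search state to B's: same bytes and (i, j), and A's stored
-- encoding is B's build at that (i, j)
def relSel (runs : List Int) (f : Int) :
    Option (Int × (Int × Int) × List Int) → Option (Int × Int × Int) → Prop
  | none, none => True
  | some a, some b => a.1 = b.1 ∧ a.2.1.1 = b.2.1 ∧ a.2.1.2 = b.2.2
      ∧ a.2.2 = buildB runs f b.2.1 b.2.2
  | _, _ => False

theorem relSel_step (runs : List Int) (f : Int) (hruns : ∀ r ∈ runs, 1 ≤ r)
    (i j : Int) (hi : 1 ≤ i) (hj : 1 ≤ j)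
    (bA : Option (Int × (Int × Int) × List Int)) (bB : Option (Int × Int × Int))
    (h : relSel runs f bA bB) :
    relSel runs f (encodeStep runs f i bA j)
      (selStep (onesOf runs f) ((zerosOf runs f).length : Int)
        ((onesOf runs f).length : Int) (ziOf runs f i) i bB j) := by
  have hc := calcPairwise_eq runs f i j hruns hi hj
  cases bA with
  | none =>
    cases bB with
    | none =>
      simp only [encodeStep, selStep, hc]
      rw [show ((onesOf runs f).map (fun r => chunksB r ((2 : Int) ^ j.toNat - 1))).sum
        = ojOf runs f j from rfl]
      exact ⟨rfl, rfl, rfl, rfl⟩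
    | some b => exact absurd h (by simp [relSel])
  | some a =>
    cases bB with
    | none => exact absurd h (by simp [relSel])
    | some b =>
      obtain ⟨h1, h2, h3, h4⟩ := h
      simp only [encodeStep, selStep, hc]
      rw [show ((onesOf runs f).map (fun r => chunksB r ((2 : Int) ^ j.toNat - 1))).sum
        = ojOf runs f j from rfl]
      obtain ⟨nb, ⟨ai, aj⟩, e⟩ := a
      obtain ⟨nb', bi, bj⟩ := b
      simp only at h1 h2 h3 h4
      subst h1 h2 h3 h4
      split_ifs with hlt
      · exact ⟨rfl, rfl, rfl, rfl⟩
      · exact ⟨rfl, rfl, rfl, rfl⟩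

theorem relSel_inner (runs : List Int) (f : Int) (hruns : ∀ r ∈ runs, 1 ≤ r)
    (i : Int) (hi : 1 ≤ i) (js : List Int) (hjs : ∀ j ∈ js, 1 ≤ j)
    (bA : Option (Int × (Int × Int) × List Int)) (bB : Option (Int × Int × Int))
    (h : relSel runs f bA bB) :
    relSel runs f (js.foldl (encodeStep runs f i) bA)
      (js.foldl (selStep (onesOf runs f) ((zerosOf runs f).length : Int)
        ((onesOf runs f).length : Int) (ziOf runs f i) i) bB) := by
  induction js generalizing bA bB with
  | nil => exact h
  | cons j js ih =>
    exact ih (fun x hx => hjs x (by simp [hx])) _ _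
      (relSel_step runs f hruns i j hi (hjs j (by simp)) bA bB h)

theorem relSel_outer (runs : List Int) (f : Int) (hruns : ∀ r ∈ runs, 1 ≤ r)
    (is js : List Int) (his : ∀ i ∈ is, 1 ≤ i) (hjs : ∀ j ∈ js, 1 ≤ j)
    (bA : Option (Int × (Int × Int) × List Int)) (bB : Option (Int × Int × Int))
    (h : relSel runs f bA bB) :
    relSel runs f
      (is.foldl (fun best i =>
        js.foldl (encodeStep runs f i) best) bA)
      (is.foldl (fun best i =>
        js.foldl (selStep (onesOf runs f)
          ((zerosOf runs f).length : Int) ((onesOf runs f).length : Int)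
          (ziOf runs f i) i) best) bB) := by
  induction is generalizing bA bB with
  | nil => exact h
  | cons i is ih =>
    exact ih (fun x hx => his x (by simp [hx])) _ _
      (relSel_inner runs f hruns i (his i (by simp)) js hjs bA bB h)

theorem unpack_eq (runs : List Int) (f : Int)
    (bA : Option (Int × (Int × Int) × List Int)) (bB : Option (Int × Int × Int))
    (h : relSel runs f bA bB) : unpackA bA = unpackB runs f bB := by
  cases bA with
  | none => cases bB with
    | none => rfl
    | some b => exact absurd h (by simp [relSel])
  | some a => cases bB with
    | none => exact absurd h (by simp [relSel])
    | some b =>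
      obtain ⟨h1, h2, h3, h4⟩ := h
      obtain ⟨nb, ⟨ai, aj⟩, e⟩ := a
      simp only [unpackA, unpackB]
      simp only at h1 h4
      rw [h1, h4]

theorem encode_eq (bit_array : List Int) (hpre : bit_array ≠ []) :
    encode_optimal_pairwise bit_array = encode_optimal_pairwise_alt bit_array := by
  have hruns := runLength_pos bit_array hpre
  unfold encode_optimal_pairwise encode_optimal_pairwise_alt
  simp only []
  generalize hrng : PySem.List.pyRange 1 13 1 = rng
  have hone : ∀ i ∈ rng, 1 ≤ i := by
    rw [← hrng]
    exact fun i hi => ((PySem.List.mem_pyRange_one).mp hi).1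
  exact unpack_eq _ _ _ _
    (relSel_outer (runLength bit_array).1 (runLength bit_array).2 hruns
      rng rng hone hone none none trivial)

-- ===== VERDICT =====
theorem encode_optimal_pairwise_spec : Claim_equal_encode_optimal_pairwise := by
  intro bit_array _ hpre
  unfold Spec_encode_optimal_pairwise
  exact encode_eq bit_array hpre
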